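-- pv_equiv track=rewrite | github.com/versa-networks/devops | python/PAN-to-Versa-Concerto-SASE/scripts/step-4.py | parse_bracket_content
-- ===== SOURCE A (Python) =====
-- from typing import Dict, Tuple, Optional, List
--
-- def parse_bracket_content(segment: str) -> Optional[Tuple[str, str, str]]:
--     lb = segment.find("[")
--     if lb < 0:
--         return None
--     in_q = False
--     i = lb + 1
--     while i < len(segment):
--         ch = segment[i]
--         if ch == '"':
--             in_q = not in_q
--         elif ch == "]" and not in_q:
--             inside = segment[lb + 1 : i]
--             before = segment[: lb + 1]
--             after = segment[i:]
--             return before, inside, after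
--         i += 1
--     return None
-- ===== SOURCE B (Python) =====
-- def parse_bracket_content(segment):
--     lb = segment.find("[")
--     if lb < 0:
--         return None
--     hits = [j for j, c in enumerate(segment)
--             if j > lb and c == "]" and segment.count('"', lb + 1, j) % 2 == 0]
--     if not hits:
--         return None
--     i = hits[0]
--     return segment[:lb + 1], segment[lb + 1:i], segment[i:]
-- ===== Notes on version B (the rewrite author's own statement) =====
-- stated objective: alternative
-- what changed: Replaces A's one-character state machine (walking the tail after '[' while toggling an in-quote flag) with a stateless filter-then-pick-first decomposition: collect every index j > lb holding ']' whose preceding quote count segment.count('"', lb+1, j) is even, and split at the first such index.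
import Mathlib
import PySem

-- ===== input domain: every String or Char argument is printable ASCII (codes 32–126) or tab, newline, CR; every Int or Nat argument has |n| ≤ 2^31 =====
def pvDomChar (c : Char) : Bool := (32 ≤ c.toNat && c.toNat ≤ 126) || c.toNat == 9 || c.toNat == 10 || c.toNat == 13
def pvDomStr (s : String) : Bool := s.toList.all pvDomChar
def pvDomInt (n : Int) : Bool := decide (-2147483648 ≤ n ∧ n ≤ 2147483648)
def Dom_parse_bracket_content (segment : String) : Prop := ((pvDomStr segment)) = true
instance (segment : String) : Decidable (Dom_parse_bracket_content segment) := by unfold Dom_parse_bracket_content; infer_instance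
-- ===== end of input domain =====

-- B replaces A's in-quote state machine (toggling a flag char by char) by a stateless
-- characterization: collect every position j > lb holding ']' that is preceded by an even
-- number of '"' since lb+1 (a quote-parity count on a slice), and split at the first one —
-- an alternative decomposition of the same result; the return values are proved equal.

-- ===== PORT A =====
-- A's while-loop: structural recursion over the chars after '[', carrying the absolute
-- index i and the in-quote flag, exactly A's branch order.
def pbcLoopA (s : List Char) (lb1 : Nat) : List Char → Nat → Bool → Option (String × String × String)
  | [], _, _ => none
  | ch :: rest, i, in_q =>
    if ch = '"' then pbcLoopA s lb1 rest (i + 1) (!in_q)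
    else if ch = ']' ∧ in_q = false then
      some (String.ofList (PySem.List.slice s none (some (lb1 : Int))),
            String.ofList (PySem.List.slice s (some (lb1 : Int)) (some (i : Int))),
            String.ofList (PySem.List.slice s (some (i : Int)) none))
    else pbcLoopA s lb1 rest (i + 1) in_q

def parse_bracket_content (segment : String) : Option (String × String × String) :=
  let s := segment.toList
  let lb := PySem.Chars.find s ['[']
  if lb < 0 then none
  else pbcLoopA s (lb.toNat + 1) (s.drop (lb.toNat + 1)) (lb.toNat + 1) false

-- ===== PORT B =====
-- B's comprehension over enumerate(segment): keep every index j > lb whose char is ']'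
-- with an even count of '"' in segment[lb+1:j] (str.count on a single-char needle is
-- ported by hand as List.count of the slice — exact), then split at hits[0] if any.
def parse_bracket_content_alt (segment : String) : Option (String × String × String) :=
  let s := segment.toList
  let lb := PySem.Chars.find s ['[']
  if lb < 0 then none
  else
    let hits := (PySem.List.enumerate s 0).filterMap (fun jc =>
      if lb < jc.1 ∧ jc.2 = ']' ∧
          (PySem.List.slice s (some (lb + 1)) (some jc.1)).count '"' % 2 = 0
      then some jc.1 else none)
    match hits with
    | [] => none
    | i :: _ =>
      some (String.ofList (PySem.List.slice s none (some (lb + 1))),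
            String.ofList (PySem.List.slice s (some (lb + 1)) (some i)),
            String.ofList (PySem.List.slice s (some i) none))

-- ===== PRECONDITION & SPEC =====
def Spec_parse_bracket_content (segment : String) (out : Option (String × String × String)) : Prop := out = parse_bracket_content_alt segment
instance (segment : String) (out : Option (String × String × String)) : Decidable (Spec_parse_bracket_content segment out) := by unfold Spec_parse_bracket_content; infer_instance

-- ===== CLAIM (what is proved, stated in full; the proofs are below) =====
def Claim_equal_parse_bracket_content : Prop := ∀ (segment : String), Dom_parse_bracket_content segment → Spec_parse_bracket_content segment (parse_bracket_content segment)

-- ===== LEMMAS AND PROOFS =====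

-- The triple both programs return once the absolute index i of the first unquoted ']' is known.
def pbcT (s : List Char) (lb1 i : Nat) : String × String × String :=
  (String.ofList (PySem.List.slice s none (some (lb1 : Int))),
   String.ofList (PySem.List.slice s (some (lb1 : Int)) (some (i : Int))),
   String.ofList (PySem.List.slice s (some (i : Int)) none))

-- relative position of the first ']' outside quotes, given the starting quote state
def pbcFq : List Char → Bool → Option Nat
  | [], _ => none
  | c :: cs, q =>
    if c = '"' then (pbcFq cs (!q)).map (· + 1)
    else if c = ']' ∧ q = false then some 0
    else (pbcFq cs q).map (· + 1)

-- ALL relative positions of ']' outside quotes (B collects them all; A stops at the first)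
def pbcHits : List Char → Bool → List Nat
  | [], _ => []
  | c :: cs, q =>
    let rest := (pbcHits cs (if c = '"' then !q else q)).map (· + 1)
    if c = ']' ∧ q = false then 0 :: rest else rest

theorem pbcLoopA_eq (s : List Char) (lb1 : Nat) :
    ∀ (cs : List Char) (i : Nat) (q : Bool),
      pbcLoopA s lb1 cs i q = (pbcFq cs q).map (fun r => pbcT s lb1 (i + r)) := by
  intro cs
  induction cs with
  | nil => intro i q; rfl
  | cons c cs ih =>
    intro i q
    by_cases h1 : c = '"'
    · simp only [pbcLoopA, pbcFq, h1, if_pos, ih, Option.map_map]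
      cases pbcFq cs (!q) with
      | none => simp
      | some v => simp only [Option.map_some, Function.comp_apply]; congr 2; omega
    · by_cases h2 : c = ']' ∧ q = false
      · simp [pbcLoopA, pbcFq, h2, pbcT]
      · simp only [pbcLoopA, pbcFq, h1, h2, ih, Option.map_map, if_false]
        cases pbcFq cs q with
        | none => simp
        | some v => simp only [Option.map_some, Function.comp_apply]; congr 2; omega

theorem pbcFq_eq_head (cs : List Char) : ∀ (q : Bool), pbcFq cs q = (pbcHits cs q).head? := by
  induction cs with
  | nil => intro q; rfl
  | cons c cs ih =>
    intro q
    by_cases h1 : c = '"'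
    · have hc : ¬ (c = ']' ∧ q = false) := by simp [h1]
      simp [pbcFq, pbcHits, h1, ih, List.head?_map]
    · by_cases h2 : c = ']' ∧ q = false
      · simp [pbcFq, pbcHits, h2]
      · simp [pbcFq, pbcHits, h1, h2, ih, List.head?_map]

-- B's filterMap over enumerate, pointwise equal to the quote-parity predicate, collects
-- exactly pbcHits shifted by the enumeration start.
-- B's filterMap over enumerate, pointwise equal to the quote-parity predicate, collects
-- exactly pbcHits shifted by the enumeration start.
theorem filterMap_enumerate_hits :
    ∀ (t : List Char) (a : Int) (q : Bool) (f : Int × Char → Option Int),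
      (∀ (k : Nat) (hk : k < t.length),
        f (a + (k : Int), t[k]) =
          if t[k] = ']' ∧ ((t.take k).count '"' + (if q then 1 else 0)) % 2 = 0
          then some (a + (k : Int)) else none) →
      (PySem.List.enumerate t a).filterMap f = (pbcHits t q).map (fun (r : Nat) => a + (r : Int)) := by
  intro t
  induction t with
  | nil => intro a q f _; simp [PySem.List.enumerate_nil, pbcHits]
  | cons c cs ih =>
    intro a q f hf
    have h0 := hf 0 (Nat.succ_pos _)
    simp only [List.getElem_cons_zero, List.take_zero, List.count_nil, Nat.zero_add,
      Nat.cast_zero, add_zero] at h0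
    have htail : (PySem.List.enumerate cs (a + 1)).filterMap f
        = (pbcHits cs (if c = '"' then !q else q)).map (fun (r : Nat) => (a + 1) + (r : Int)) := by
      apply ih (a + 1) (if c = '"' then !q else q) f
      intro k hk
      have hk1 := hf (k + 1) (Nat.succ_lt_succ hk)
      simp only [List.getElem_cons_succ, List.take_succ_cons, List.count_cons,
        beq_iff_eq] at hk1
      rw [show a + ((k + 1 : Nat) : Int) = (a + 1) + (k : Int) by push_cast; ring] at hk1
      rw [hk1]
      apply if_congr _ rfl rfl
      apply and_congr_right
      intro _
      by_cases hcq : c = '"' <;> by_cases hq : q <;> simp [hcq, hq] <;> omega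
    by_cases h2 : c = ']' ∧ q = false
    · have h0' : f (a, c) = some a := by
        rw [h0, if_pos ⟨h2.1, by simp [h2.2]⟩]
      simp only [PySem.List.enumerate_cons, List.filterMap_cons, h0', htail]
      simp only [pbcHits, if_pos h2, List.map_cons]
      congr 1
      · simp
      · rw [List.map_map]
        apply List.map_congr_left
        intro r _
        simp only [Function.comp_apply]
        push_cast
        ring
    · have h0' : f (a, c) = none := by
        rw [h0, if_neg]
        rintro ⟨hc, hp⟩
        apply h2
        refine ⟨hc, ?_⟩
        cases q with
        | false => rfl
        | true => simp at hp
      simp only [PySem.List.enumerate_cons, List.filterMap_cons, h0', htail]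
      simp only [pbcHits, if_neg h2]
      rw [List.map_map]
      apply List.map_congr_left
      intro r _
      simp only [Function.comp_apply]
      push_cast
      ring

theorem filterMap_prefix_nil (s : List Char) (lb : Int) (n : Nat) (hn : n ≤ lb + 1)
    (f : Int × Char → Option Int)
    (hf : ∀ jc, (lb < jc.1 → False) → f jc = none) :
    (PySem.List.enumerate (s.take n) 0).filterMap f = [] := by
  rw [List.filterMap_eq_nil_iff]
  intro jc hjc
  obtain ⟨k, hk, rfl⟩ := (PySem.List.mem_enumerate_iff _ _ _).mp hjc
  apply hf
  intro hlt
  have hkn : k < n := lt_of_lt_of_le hk (by simp)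
  omega

-- ===== VERDICT (by name: the statement is the Claim_ definition above) =====
theorem parse_bracket_content_spec : Claim_equal_parse_bracket_content := by
  intro segment _
  show parse_bracket_content segment = parse_bracket_content_alt segment
  simp only [parse_bracket_content, parse_bracket_content_alt]
  by_cases hneg : PySem.Chars.find segment.toList ['['] < 0
  · rw [if_pos hneg, if_pos hneg]
  · rw [if_neg hneg, if_neg hneg]
    set s := segment.toList with hs
    set lb := PySem.Chars.find s ['['] with hlb
    have hlb0 : 0 ≤ lb := by omega
    have hlt : lb.toNat < s.length := by
      obtain ⟨hpre, -⟩ := PySem.Chars.find_spec (s := s) (sub := ['[']) (by omega)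
      obtain ⟨u, hu⟩ := hpre
      have h1 : (s.drop lb.toNat).length = 1 + u.length := by rw [← hu]; simp; omega
      rw [List.length_drop] at h1
      omega
    set lb1 : Nat := lb.toNat + 1 with hlb1
    set t := s.drop lb1 with ht
    clear_value t lb1 lb s
    have hsplit : s = s.take lb1 ++ t := by
      rw [ht]
      exact (List.take_append_drop lb1 s).symm
    have hlen' : (s.take lb1).length = lb1 := by
      rw [List.length_take]
      omega
    have henum : PySem.List.enumerate s 0
        = PySem.List.enumerate (s.take lb1) 0 ++ PySem.List.enumerate t (0 + ((lb1 : Nat) : Int)) := by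
      conv_lhs => rw [hsplit]
      rw [PySem.List.enumerate_append, hlen']
    have hkey : (PySem.List.enumerate s 0).filterMap (fun jc =>
        if lb < jc.1 ∧ jc.2 = ']' ∧
            (PySem.List.slice s (some (lb + 1)) (some jc.1)).count '"' % 2 = 0
        then some jc.1 else none)
        = (pbcHits t false).map (fun (r : Nat) => (0 + ((lb1 : Nat) : Int)) + (r : Int)) := by
      rw [henum, List.filterMap_append]
      rw [filterMap_prefix_nil s lb lb1 (by omega) _ ?hpre]
      case hpre =>
        intro jc hjc
        rw [if_neg]
        rintro ⟨h1, -⟩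
        exact hjc h1
      rw [List.nil_append]
      apply filterMap_enumerate_hits t _ false
      intro k hk
      dsimp only
      have hk0 : (0 : Int) ≤ (k : Int) := Int.natCast_nonneg k
      have hjgt : lb < 0 + ((lb1 : Nat) : Int) + (k : Int) := by
        have : ((lb1 : Nat) : Int) = lb + 1 := by omega
        omega
      have hslice : PySem.List.slice s (some (lb + 1)) (some (0 + ((lb1 : Nat) : Int) + (k : Int)))
          = t.take k := by
        rw [show (0 + ((lb1 : Nat) : Int) + (k : Int)) = ((lb1 + k : Nat) : Int) by push_cast; ring,
          show lb + 1 = ((lb1 : Nat) : Int) by omega,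
          PySem.List.slice_natCast, ht]
        congr 1
        omega
      rw [hslice]
      by_cases hc : t[k] = ']' ∧ (t.take k).count '"' % 2 = 0
      · rw [if_pos ⟨hjgt, hc.1, hc.2⟩, if_pos ⟨hc.1, by simpa using hc.2⟩]
      · rw [if_neg (by tauto), if_neg (by simpa using hc)]
    rw [hkey]
    rw [pbcLoopA_eq s lb1 t lb1 false, pbcFq_eq_head]
    cases hh : pbcHits t false with
    | nil => simp
    | cons r rest =>
      simp only [List.head?_cons, Option.map_some, List.map_cons, pbcT]
      rw [show lb + 1 = ((lb1 : Nat) : Int) by omega,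
        show (0 + ((lb1 : Nat) : Int)) + (r : Int) = ((lb1 + r : Nat) : Int) by push_cast; ring]
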